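-- pv_equiv track=rewrite | github.com/awebson/congressional_adversary | src/evaluations/autograder.py | count_num_skipped
-- ===== SOURCE A (Python) =====
-- import pprint
-- from typing import Tuple, List, Dict, Counter, Optional
--
-- def count_num_skipped(
--         submissions: List[List[Dict[str, str]]],  # each submission is a list of CSV row
--         num_labels: int
--         ) -> Dict[str, int]:
--     label_column = 'label_{}.on'
--     worker_skipped: Dict[str, int] = {}
--     for submission in submissions:
--         num_skipped = 0
--         for entry in submission:
--             worker_label: Optional[int] = None
--             for label_index in range(num_labels):
--                 if entry[label_column.format(label_index)] == 'true':
--                     worker_label = label_index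
--             if worker_label is None:  # the worker didn't select any option
--                 worker_label = 0
--             if worker_label == 0:
--                 num_skipped += 1
--         # end one submission of 30 examples
--         worker_id = submission[0]['WorkerId']
--         worker_skipped[worker_id] = num_skipped
--     # end all submissions
--     pprint.pprint(worker_skipped)
--     return worker_skipped
-- ===== SOURCE B (Python) =====
-- from typing import List, Dict
--
-- def count_num_skipped(
--         submissions: List[List[Dict[str, str]]],
--         num_labels: int
--         ) -> Dict[str, int]:
--     # An entry is "skipped" iff no label with index >= 1 is 'true'
--     # (a highest-true-index of 0, or no true label at all, both count as skipped).
--     worker_skipped: Dict[str, int] = {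
--         submission[0]['WorkerId']:
--             sum(1 for entry in submission
--                 if not any(entry['label_{}.on'.format(i)] == 'true'
--                            for i in range(1, num_labels)))
--         for submission in submissions
--     }
--     # (A also pprints the dict; B omits that side effect, return value unchanged)
--     return worker_skipped
-- ===== Notes on version B (the rewrite author's own statement) =====
-- stated objective: simpler
-- what changed: The inner highest-true-label-index scan with its None/0 fallback and the counting loop are replaced by a dict comprehension whose value is a direct count of entries with no 'true' label at index 1..num_labels-1 (a boolean any over range(1, num_labels)).
import Mathlib
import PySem

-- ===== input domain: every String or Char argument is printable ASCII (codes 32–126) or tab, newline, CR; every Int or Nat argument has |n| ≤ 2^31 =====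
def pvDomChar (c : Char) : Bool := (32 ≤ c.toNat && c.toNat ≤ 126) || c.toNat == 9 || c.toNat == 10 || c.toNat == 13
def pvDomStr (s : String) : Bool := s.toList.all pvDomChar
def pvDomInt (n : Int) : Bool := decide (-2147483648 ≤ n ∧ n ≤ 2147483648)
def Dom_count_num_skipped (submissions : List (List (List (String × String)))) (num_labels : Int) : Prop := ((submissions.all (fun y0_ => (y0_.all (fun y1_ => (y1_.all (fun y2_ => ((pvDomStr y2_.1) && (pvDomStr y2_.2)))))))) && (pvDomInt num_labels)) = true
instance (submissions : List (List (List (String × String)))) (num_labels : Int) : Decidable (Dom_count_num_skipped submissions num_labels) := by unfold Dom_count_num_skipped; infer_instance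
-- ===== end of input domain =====

-- B replaces A's highest-true-label-index scan (with its None/0 fallback) and counting loop by a
-- dict comprehension counting entries with no 'true' label at index 1..num_labels-1 (simpler);
-- only the return value is compared (the pprint side effect is out of scope for the claim).

-- ===== PORT A =====
-- label_column.format(label_index)
def pvLabelKey (i : Int) : String := "label_" ++ PySem.Int.toStr i ++ ".on"

def count_num_skipped (submissions : List (List (List (String × String)))) (num_labels : Int) : List (String × Int) :=
  (submissions.foldl (fun (worker_skipped : PySem.Dict String Int) submission =>
      let num_skipped : Int := submission.foldl (fun num_skipped entry =>
        let worker_label : Option Int :=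
          (PySem.List.pyRange 0 num_labels 1).foldl (fun worker_label label_index =>
            if (PySem.Dict.mk entry).getD (pvLabelKey label_index) "" == "true" then
              some label_index
            else worker_label) none
        -- 'if worker_label is None: worker_label = 0'
        let worker_label : Int := worker_label.getD 0
        if worker_label == 0 then num_skipped + 1 else num_skipped) 0
      -- worker_id = submission[0]['WorkerId']  (Pre_ guarantees both lookups succeed)
      let worker_id : String := (PySem.Dict.mk (PySem.List.pyGetD submission 0 [])).getD "WorkerId" ""
      worker_skipped.insert worker_id num_skipped)
    PySem.Dict.empty).items

-- ===== PORT B =====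
def count_num_skipped_alt (submissions : List (List (List (String × String)))) (num_labels : Int) : List (String × Int) :=
  (submissions.foldl (fun (worker_skipped : PySem.Dict String Int) submission =>
      worker_skipped.insert
        ((PySem.Dict.mk (PySem.List.pyGetD submission 0 [])).getD "WorkerId" "")
        ((submission.countP (fun entry =>
            !((PySem.List.pyRange 1 num_labels 1).any (fun i =>
                (PySem.Dict.mk entry).getD ("label_" ++ PySem.Int.toStr i ++ ".on") "" == "true")))) : Int))
    PySem.Dict.empty).items

-- ===== PRECONDITION & SPEC =====
-- Pre_ excludes exactly the inputs on which the Python A raises (KeyError/IndexError): every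
-- submission must be nonempty, its first entry must carry 'WorkerId', and every entry must carry
-- every key label_i.on for 0 <= i < num_labels.
def Pre_count_num_skipped (submissions : List (List (List (String × String)))) (num_labels : Int) : Prop :=
  ∀ submission ∈ submissions, submission ≠ [] ∧
    (PySem.Dict.mk (submission.headD [])).contains "WorkerId" = true ∧
    ∀ entry ∈ submission,
      -- the length bound is implied by the key requirement (num_labels distinct keys must be
      -- present) and only lets the condition be decided without materializing a huge range
      num_labels ≤ (entry.length : Int) ∧
      -- given that bound, min num_labels (entry.length) = num_labels: same range as A scans
      ∀ i ∈ PySem.List.pyRange 0 (min num_labels (entry.length : Int)) 1,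
        (PySem.Dict.mk entry).contains (pvLabelKey i) = true
instance (submissions : List (List (List (String × String)))) (num_labels : Int) : Decidable (Pre_count_num_skipped submissions num_labels) := by unfold Pre_count_num_skipped; infer_instance

def pvWitness_count_num_skipped : (List (List (List (String × String)))) × Int :=
  ([[[("WorkerId", "w1"), ("label_0.on", "true"), ("label_1.on", "false")],
     [("WorkerId", "w1"), ("label_0.on", "false"), ("label_1.on", "true")]]], 2)

def Spec_count_num_skipped (submissions : List (List (List (String × String)))) (num_labels : Int) (out : List (String × Int)) : Prop := out = count_num_skipped_alt submissions num_labels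
instance (submissions : List (List (List (String × String)))) (num_labels : Int) (out : List (String × Int)) : Decidable (Spec_count_num_skipped submissions num_labels out) := by unfold Spec_count_num_skipped; infer_instance

-- ===== CLAIM (what is proved, stated in full; the proofs are below) =====
def Claim_equal_count_num_skipped : Prop := ∀ (submissions : List (List (List (String × String)))) (num_labels : Int), Dom_count_num_skipped submissions num_labels → Pre_count_num_skipped submissions num_labels → Spec_count_num_skipped submissions num_labels (count_num_skipped submissions num_labels)

-- ===== LEMMAS AND PROOFS =====

-- The last-true-index fold lands on 0 iff no element of the (≥ 1) list tests true and the
-- accumulator already stood at none-or-0.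
lemma mark_aux (g : Int → Bool) (l : List Int) (a : Option Int) (hl : ∀ i ∈ l, 1 ≤ i) :
    ((l.foldl (fun wl i => if g i then some i else wl) a).getD 0 = 0) ↔
      (l.any g = false ∧ a.getD 0 = 0) := by
  induction l generalizing a with
  | nil => simp
  | cons i t ih =>
    have hi : 1 ≤ i := hl i (by simp)
    have ht : ∀ j ∈ t, 1 ≤ j := fun j hj => hl j (by simp [hj])
    simp only [List.foldl_cons, List.any_cons]
    rw [ih _ ht]
    by_cases hg : g i = true
    · simp [hg]; omega
    · simp [hg]

-- Per entry: A's "worker_label == 0" test equals B's "no true label in range(1, num_labels)".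
lemma entry_cond_eq (num_labels : Int) (g : Int → Bool) :
    (((PySem.List.pyRange 0 num_labels 1).foldl
        (fun wl i => if g i then some i else wl) none).getD 0 == 0) =
      !((PySem.List.pyRange 1 num_labels 1).any g) := by
  by_cases h : 0 < num_labels
  · rw [PySem.List.pyRange_one_cons h, List.foldl_cons]
    have hl : ∀ i ∈ PySem.List.pyRange 1 num_labels 1, 1 ≤ i := by
      intro i hi; exact (PySem.List.mem_pyRange_one.mp hi).1
    rcases Bool.eq_false_or_eq_true ((PySem.List.pyRange 1 num_labels 1).any g) with hany | hany
    · have h2 : ¬ ((PySem.List.pyRange 1 num_labels 1).foldl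
          (fun wl i => if g i then some i else wl) (if g 0 then some 0 else none)).getD 0 = 0 := by
        rw [mark_aux g _ _ hl]
        simp [hany]
      simp [h2, hany]
    · have h1 : ((PySem.List.pyRange 1 num_labels 1).foldl
          (fun wl i => if g i then some i else wl) (if g 0 then some 0 else none)).getD 0 = 0 := by
        rw [mark_aux g _ _ hl]
        exact ⟨hany, by by_cases hg : g 0 = true <;> simp [hg]⟩
      simp [h1, hany]
  · have h0 : PySem.List.pyRange 0 num_labels 1 = [] :=
      PySem.List.pyRange_one_eq_nil (by omega)
    have h1 : PySem.List.pyRange 1 num_labels 1 = [] :=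
      PySem.List.pyRange_one_eq_nil (by omega)
    simp [h0, h1]

-- Per submission: A's inner counting loop equals B's countP.
lemma inner_count_eq (num_labels : Int) (submission : List (List (String × String))) :
    (submission.foldl (fun num_skipped entry =>
        if (((PySem.List.pyRange 0 num_labels 1).foldl (fun wl i =>
              if (PySem.Dict.mk entry).getD (pvLabelKey i) "" == "true" then some i else wl)
            none).getD 0 == 0)
        then num_skipped + 1 else num_skipped) (0 : Int)) =
      ((submission.countP (fun entry =>
          !((PySem.List.pyRange 1 num_labels 1).any (fun i =>
              (PySem.Dict.mk entry).getD ("label_" ++ PySem.Int.toStr i ++ ".on") "" == "true")))) : Int) := by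
  rw [PySem.List.foldl_if_add_one, zero_add]
  congr 1
  apply List.countP_congr
  intro entry _
  rw [entry_cond_eq num_labels (fun i => (PySem.Dict.mk entry).getD (pvLabelKey i) "" == "true")]
  simp [pvLabelKey]

theorem count_num_skipped_spec_aux (submissions : List (List (List (String × String)))) (num_labels : Int) :
    count_num_skipped submissions num_labels = count_num_skipped_alt submissions num_labels := by
  unfold count_num_skipped count_num_skipped_alt
  congr 1
  apply PySem.List.foldl_congr_mem
  intro acc submission hmem
  simp only [inner_count_eq]

-- ===== VERDICT (by name: the statement is the Claim_ definition above) =====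
theorem count_num_skipped_spec : Claim_equal_count_num_skipped := by
  intro submissions num_labels _ _
  exact count_num_skipped_spec_aux submissions num_labels
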